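-- pv_equiv track=rewrite | github.com/Ludovicofu/scan | vuln_scan/modules/command_injection_scanner.py | extract_command_output
-- ===== SOURCE A (Python) =====
-- def extract_command_output(response, matched_pattern):
--     """从响应中提取命令输出"""
--     if not response or not matched_pattern:
--         return "无法提取输出"
--
--     # 尝试从响应中提取与模式相关的内容
--     try:
--         # 查找包含模式的行
--         lines = response.split('\n')
--         for i, line in enumerate(lines):
--             if matched_pattern in line:
--                 # 返回包含匹配模式的行及其前后几行
--                 context_start = max(0, i - 2)
--                 context_end = min(len(lines), i + 3)
--                 return '\n'.join(lines[context_start:context_end])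
--
--         # 如果无法找到明确的上下文，返回模式周围的内容
--         pattern_pos = response.find(matched_pattern)
--         if pattern_pos >= 0:
--             start_pos = max(0, pattern_pos - 50)
--             end_pos = min(len(response), pattern_pos + len(matched_pattern) + 50)
--             return response[start_pos:end_pos]
--
--     except:
--         pass
--
--     return f"找到匹配: {matched_pattern}"
-- ===== SOURCE B (Python) =====
-- def extract_command_output(response, matched_pattern):
--     """从响应中提取命令输出 — 流式单遍实现：维护最近两行的窗口，不用下标运算"""
--     if not response or not matched_pattern:
--         return "无法提取输出"
--
--     window = []
--     it = iter(response.split('\n'))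
--     for cur in it:
--         if matched_pattern in cur:
--             following = [nxt for _, nxt in zip(range(2), it)]
--             return '\n'.join(window + [cur] + following)
--         window = (window + [cur])[-2:]
--
--     pos = response.find(matched_pattern)
--     if pos >= 0:
--         return response[max(0, pos - 50):pos + len(matched_pattern) + 50]
--
--     return "找到匹配: " + matched_pattern
-- ===== Notes on version B (the rewrite author's own statement) =====
-- stated objective: alternative
-- what changed: Replaces A's enumerate-index loop with global max/min slicing of the line list by a single streaming pass that maintains a window of the last two lines and grabs the next two lines from the iterator at the match, with no indices at all.
import Mathlib
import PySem

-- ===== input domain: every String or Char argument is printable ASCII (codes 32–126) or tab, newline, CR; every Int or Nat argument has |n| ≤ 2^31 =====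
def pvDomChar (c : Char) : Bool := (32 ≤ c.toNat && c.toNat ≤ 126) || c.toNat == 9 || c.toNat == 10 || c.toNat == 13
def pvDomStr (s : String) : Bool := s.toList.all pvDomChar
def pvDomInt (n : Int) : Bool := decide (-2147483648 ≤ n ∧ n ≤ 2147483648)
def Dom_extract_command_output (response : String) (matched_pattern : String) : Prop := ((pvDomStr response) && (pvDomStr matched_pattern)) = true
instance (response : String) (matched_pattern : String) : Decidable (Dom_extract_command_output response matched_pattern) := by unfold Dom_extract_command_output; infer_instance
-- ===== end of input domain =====

-- B replaces A's enumerate loop and index slicing by a streaming pass keeping a window of the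
-- last two lines (objective: alternative decomposition, same cost). Equivalence of the return
-- value is proved on the whole domain; neither program mutates its arguments.

-- ===== PORT A =====
-- A's 'for i, line in enumerate(lines): if matched_pattern in line: return ...' loop.
def aScan (mp : String) (lines : List String) : List String → Int → Option String
  | [], _ => none
  | line :: rest, i =>
    if PySem.Str.isIn mp line then
      some (PySem.Str.join "\n" (PySem.List.slice lines (some (max 0 (i - 2)))
        (some (min (PySem.List.len lines) (i + 3)))))
    else aScan mp lines rest (i + 1)

def extract_command_output (response : String) (matched_pattern : String) : String :=
  if response == "" || matched_pattern == "" then "无法提取输出"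
  else
    let lines := (PySem.Str.split? response "\n").getD []
    match aScan matched_pattern lines lines 0 with
    | some s => s
    | none =>
      let pattern_pos := PySem.Str.find response matched_pattern
      if pattern_pos ≥ 0 then
        let start_pos := max 0 (pattern_pos - 50)
        let end_pos := min (PySem.Str.len response) (pattern_pos + PySem.Str.len matched_pattern + 50)
        PySem.Str.slice response (some start_pos) (some end_pos)
      else "找到匹配: " ++ matched_pattern

-- ===== PORT B =====
-- B's 'for cur in it: ... window = (window + [cur])[-2:]' streaming loop; the two lines after
-- the match are the next two elements of the iterator, i.e. 'rest.take 2'.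
def bLoop (mp : String) (window : List String) : List String → Option String
  | [] => none
  | cur :: rest =>
    if PySem.Str.isIn mp cur then
      some (PySem.Str.join "\n" (window ++ cur :: rest.take 2))
    else bLoop mp (PySem.List.slice (window ++ [cur]) (some (-2)) none) rest

def extract_command_output_alt (response : String) (matched_pattern : String) : String :=
  if response == "" || matched_pattern == "" then "无法提取输出"
  else
    match bLoop matched_pattern [] ((PySem.Str.split? response "\n").getD []) with
    | some s => s
    | none =>
      let pos := PySem.Str.find response matched_pattern
      if pos ≥ 0 then
        PySem.Str.slice response (some (max 0 (pos - 50)))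
          (some (pos + PySem.Str.len matched_pattern + 50))
      else "找到匹配: " ++ matched_pattern

-- ===== PRECONDITION & SPEC =====
def Spec_extract_command_output (response : String) (matched_pattern : String) (out : String) : Prop := out = extract_command_output_alt response matched_pattern
instance (response : String) (matched_pattern : String) (out : String) : Decidable (Spec_extract_command_output response matched_pattern out) := by unfold Spec_extract_command_output; infer_instance

-- ===== CLAIM (what is proved, stated in full; the proofs are below) =====
def Claim_equal_extract_command_output : Prop := ∀ (response : String) (matched_pattern : String), Dom_extract_command_output response matched_pattern → Spec_extract_command_output response matched_pattern (extract_command_output response matched_pattern)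

-- ===== LEMMAS AND PROOFS =====

-- B's window update (window + [cur])[-2:] keeps the invariant 'window = last two processed lines'.
lemma window_step (pre : List String) (cur : String) :
    PySem.List.slice (pre.drop (pre.length - 2) ++ [cur]) (some (-2)) none
      = (pre ++ [cur]).drop ((pre ++ [cur]).length - 2) := by
  rw [PySem.List.slice_from_neg_ofNat _ 2 (by norm_num)]
  simp only [List.drop_append, List.drop_drop, List.length_append, List.length_drop,
    List.length_cons, List.length_nil]
  congr 1 <;> [congr 1; congr 1] <;> omega

-- The matched line's context slice is the window, the line itself, and the next two lines.
lemma slice_context (pre rest' : List String) (cur : String) :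
    PySem.List.slice (pre ++ cur :: rest') (some (max 0 ((pre.length : Int) - 2)))
        (some (min (PySem.List.len (pre ++ cur :: rest')) ((pre.length : Int) + 3)))
      = pre.drop (pre.length - 2) ++ cur :: rest'.take 2 := by
  have hmax : max 0 ((pre.length : Int) - 2) = ((pre.length - 2 : Nat) : Int) := by omega
  have hmin : min (PySem.List.len (pre ++ cur :: rest')) ((pre.length : Int) + 3)
      = ((min (pre.length + 1 + rest'.length) (pre.length + 3) : Nat) : Int) := by
    simp [PySem.List.len_eq]; omega
  rw [hmax, hmin, PySem.List.slice_natCast, List.drop_append]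
  have h0 : pre.length - 2 - pre.length = 0 := by omega
  rw [h0, List.drop_zero, List.take_append]
  rw [List.take_of_length_le (by simp only [List.length_drop]; omega)]
  congr 1
  have hlen : (pre.drop (pre.length - 2)).length = pre.length - (pre.length - 2) :=
    List.length_drop
  rw [hlen]
  have hK : min (pre.length + 1 + rest'.length) (pre.length + 3) - (pre.length - 2)
      - (pre.length - (pre.length - 2)) = min 2 rest'.length + 1 := by omega
  rw [hK, List.take_succ_cons, ← List.take_take, List.take_length]

lemma scan_eq (mp : String) : ∀ (rest pre : List String),
    aScan mp (pre ++ rest) rest (pre.length : Int)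
      = bLoop mp (pre.drop (pre.length - 2)) rest := by
  intro rest
  induction rest with
  | nil => intro pre; rfl
  | cons cur rest' ih =>
    intro pre
    simp only [aScan, bLoop]
    by_cases h : PySem.Str.isIn mp cur = true
    · simp only [h, if_true, slice_context]
    · simp only [eq_false_of_ne_true h, window_step]
      have := ih (pre ++ [cur])
      simpa [List.append_assoc] using this

-- B's fallback slice omits A's 'min(len(response), ...)' upper bound; slicing clamps, so equal.
lemma slice_min_len_list {alpha : Type} (xs : List alpha) (a b : Int) :
    PySem.List.slice xs (some a) (some (min (xs.length : Int) b))
      = PySem.List.slice xs (some a) (some b) := by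
  have h : PySem.List.clampIdx xs.length (min (xs.length : Int) b)
      = PySem.List.clampIdx xs.length b := by
    simp only [PySem.List.clampIdx]
    split_ifs <;> omega
  simp only [PySem.List.slice, h]

lemma slice_min_len (s : String) (a b : Int) :
    PySem.Str.slice s (some a) (some (min (PySem.Str.len s) b))
      = PySem.Str.slice s (some a) (some b) := by
  rw [← String.toList_inj, PySem.Str.toList_slice, PySem.Str.toList_slice, PySem.Str.len_eq]
  exact slice_min_len_list s.toList a b

-- ===== VERDICT (by name: the statement is the Claim_ definition above) =====
theorem extract_command_output_spec : Claim_equal_extract_command_output := by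
  intro response matched_pattern _
  unfold Spec_extract_command_output extract_command_output extract_command_output_alt
  by_cases hg : (response == "" || matched_pattern == "") = true
  · simp [hg]
  · simp only [hg]
    have hs := scan_eq matched_pattern ((PySem.Str.split? response "\n").getD []) []
    simp only [List.nil_append, List.length_nil, Nat.cast_zero, List.drop_nil] at hs
    rw [hs]
    cases bLoop matched_pattern [] ((PySem.Str.split? response "\n").getD []) with
    | some s => rfl
    | none =>
      rw [slice_min_len]
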